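-- pv_equiv track=rewrite | github.com/Uxinnn/Advent-of-Code | 2022/day06/day06.py | get_unique_substr_index
-- ===== SOURCE A (Python) =====
-- def get_unique_substr_index(datastream, k):
--     """
--     Return the first index in which a sliding window has of length k are all unique values.
--     :param datastream: input datastream
--     :param k: length of sliding window
--     :return: first index i in which values of index (i-k+1) to k are all unique.
--     """
--     window = ""
--     for i, c in enumerate(datastream):
--         if len(window) == k and len(set(window)) == k:
--             return i
--         else:
--             if len(window) == k:
--                 window = window[1:]
--             window += c
-- ===== SOURCE B (Python) =====
-- def get_unique_substr_index(datastream, k):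
--     """
--     Return the first index i such that the k characters before i are all distinct.
--     O(n): sliding window with an incremental frequency counter; `dups` is the number
--     of distinct characters currently occurring at least twice in the window.
--     """
--     n = len(datastream)
--     if k < 0 or k >= n:
--         return None
--     counts = {}
--     dups = 0
--     for i, c in enumerate(datastream):
--         if i >= k:
--             if dups == 0:
--                 return i
--             old = datastream[i - k]
--             counts[old] -= 1
--             if counts[old] == 1:
--                 dups -= 1
--         counts[c] = counts.get(c, 0) + 1
--         if counts[c] == 2:
--             dups += 1
--     return None
-- ===== Notes on version B (the rewrite author's own statement) =====
-- stated objective: faster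
-- what changed: Instead of rebuilding a set of the whole k-char window at every position, B slides a window once over the string maintaining a per-character frequency dict and a count of duplicated characters, so each step is O(1).
import Mathlib
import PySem

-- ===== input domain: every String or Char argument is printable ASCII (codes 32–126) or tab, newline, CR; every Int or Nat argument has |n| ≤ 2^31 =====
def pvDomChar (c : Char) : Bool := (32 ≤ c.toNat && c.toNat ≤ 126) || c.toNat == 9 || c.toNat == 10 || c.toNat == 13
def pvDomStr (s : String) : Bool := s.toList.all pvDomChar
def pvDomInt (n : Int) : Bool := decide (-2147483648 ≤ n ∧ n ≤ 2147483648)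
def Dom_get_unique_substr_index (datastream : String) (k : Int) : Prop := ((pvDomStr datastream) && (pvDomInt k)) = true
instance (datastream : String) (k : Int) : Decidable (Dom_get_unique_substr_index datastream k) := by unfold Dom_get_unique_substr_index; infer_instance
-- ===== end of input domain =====

-- B replaces A's per-position set(window) rebuild by a single sliding pass with an
-- incremental frequency counter (objective: faster).

-- ===== PORT A =====
-- literal port of A: window threaded through the loop, set rebuilt at each step
def aGo (k : Int) : List (Int × Char) → List Char → Option Int
  | [], _ => none
  | (i, c) :: rest, w =>
    if (w.length : Int) = k ∧ ((PySem.Set.ofList w).length : Int) = k then some i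
    else aGo k rest ((if (w.length : Int) = k then PySem.List.slice w (some 1) none else w) ++ [c])

def get_unique_substr_index (datastream : String) (k : Int) : Option Int :=
  aGo k (PySem.List.enumerate datastream.toList 0) []

-- ===== PORT B =====
-- counts[c] = counts.get(c, 0) + 1; if it became 2 one more char is duplicated
def bAdd (counts : PySem.Dict Char Int) (dups : Int) (c : Char) : PySem.Dict Char Int × Int :=
  let c2 := counts.getD c 0 + 1
  (counts.insert c c2, if c2 = 2 then dups + 1 else dups)

def bGo (s : List Char) (k : Int) : List (Int × Char) → PySem.Dict Char Int → Int → Option Int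
  | [], _, _ => none
  | (i, c) :: rest, counts, dups =>
    if k ≤ i then
      if dups = 0 then some i
      else
        -- datastream[i - k]: here k ≤ i < len s, so the index is always in range and
        -- the .getD default is never used; counts[old] always exists (old is in the window).
        let old := (PySem.List.pyGet? s (i - k)).getD ' '
        let c1 := counts.getD old 0 - 1
        let counts1 := counts.insert old c1
        let dups1 := if c1 = 1 then dups - 1 else dups
        let p := bAdd counts1 dups1 c
        bGo s k rest p.1 p.2
    else
      let p := bAdd counts dups c
      bGo s k rest p.1 p.2

def get_unique_substr_index_alt (datastream : String) (k : Int) : Option Int :=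
  if k < 0 ∨ (datastream.toList.length : Int) ≤ k then none
  else bGo datastream.toList k (PySem.List.enumerate datastream.toList 0) PySem.Dict.empty 0

-- ===== PRECONDITION & SPEC =====
def Spec_get_unique_substr_index (datastream : String) (k : Int) (out : Option Int) : Prop := out = get_unique_substr_index_alt datastream k
instance (datastream : String) (k : Int) (out : Option Int) : Decidable (Spec_get_unique_substr_index datastream k out) := by unfold Spec_get_unique_substr_index; infer_instance

-- ===== CLAIM (what is proved, stated in full; the proofs are below) =====
def Claim_equal_get_unique_substr_index : Prop := ∀ (datastream : String) (k : Int), Dom_get_unique_substr_index datastream k → Spec_get_unique_substr_index datastream k (get_unique_substr_index datastream k)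

-- ===== LEMMAS AND PROOFS =====

-- the window A maintains just before processing index iN: the last min(iN,k) seen chars
def wnd (s : List Char) (kN iN : Nat) : List Char := (s.take iN).drop (iN - kN)

-- number of distinct characters occurring at least twice (what B's `dups` tracks)
def dupCount (m : Multiset Char) : Nat := (m.toFinset.filter (fun c => 2 ≤ m.count c)).card

lemma dup_cons (m : Multiset Char) (c : Char) :
    dupCount (c ::ₘ m) = dupCount m + (if m.count c = 1 then 1 else 0) := by
  unfold dupCount
  have hmem : ∀ (x : Char) (mm : Multiset Char), x ∈ mm ↔ 0 < mm.count x :=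
    fun x mm => Multiset.count_pos.symm
  by_cases h1 : m.count c = 1
  · have hset : (c ::ₘ m).toFinset.filter (fun x => 2 ≤ (c ::ₘ m).count x)
        = insert c (m.toFinset.filter (fun x => 2 ≤ m.count x)) := by
      ext x
      rw [Finset.mem_insert, Finset.mem_filter, Finset.mem_filter, Multiset.mem_toFinset,
        Multiset.mem_toFinset, hmem, hmem, Multiset.count_cons]
      by_cases hx : x = c
      · subst hx; simp [h1]
      · simp [hx]
    rw [hset, Finset.card_insert_of_notMem (by simp [h1]), if_pos h1]
  · have hset : (c ::ₘ m).toFinset.filter (fun x => 2 ≤ (c ::ₘ m).count x)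
        = m.toFinset.filter (fun x => 2 ≤ m.count x) := by
      ext x
      rw [Finset.mem_filter, Finset.mem_filter, Multiset.mem_toFinset,
        Multiset.mem_toFinset, hmem, hmem, Multiset.count_cons]
      by_cases hx : x = c
      · subst hx; simp; omega
      · simp [hx]
    rw [hset, if_neg h1, Nat.add_zero]

lemma dup_zero_iff (w : List Char) : dupCount (↑w) = 0 ↔ w.Nodup := by
  unfold dupCount
  rw [Finset.card_eq_zero, Finset.filter_eq_empty_iff, List.nodup_iff_count_le_one]
  constructor
  · intro h x
    by_cases hx : x ∈ w
    · have := h (by simpa [Multiset.mem_toFinset] using hx)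
      simp only [Multiset.coe_count] at this
      omega
    · simp [List.count_eq_zero_of_not_mem hx]
  · intro h x hx
    simp only [Multiset.coe_count]
    have := h x
    omega

lemma dup_cons_list (c : Char) (t : List Char) :
    dupCount ↑(c :: t) = dupCount ↑t + (if t.count c = 1 then 1 else 0) := by
  rw [← Multiset.cons_coe, dup_cons]
  simp [Multiset.coe_count]

lemma dup_append (t : List Char) (c : Char) :
    dupCount ↑(t ++ [c]) = dupCount ↑t + (if t.count c = 1 then 1 else 0) := by
  have hp : (↑(t ++ [c]) : Multiset Char) = ↑(c :: t) :=
    Multiset.coe_eq_coe.mpr (List.perm_append_singleton c t)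
  rw [hp, dup_cons_list]

lemma setlen_eq_iff (w : List Char) :
    (PySem.Set.ofList w).length = w.length ↔ w.Nodup := by
  constructor
  · intro h
    have hperm : (PySem.Set.ofList w).Perm w.dedup := by
      apply List.perm_of_nodup_nodup_toFinset_eq (PySem.Set.nodup_ofList w) (List.nodup_dedup w)
      ext x
      simp [PySem.Set.mem_ofList, List.mem_dedup]
    have hlen : w.dedup.length = w.length := by rw [← hperm.length_eq, h]
    have hde := (List.dedup_sublist w).eq_of_length hlen
    rw [← hde]
    exact List.nodup_dedup w
  · intro h
    rw [PySem.Set.ofList_eq_self_of_nodup w h]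

lemma enum_drop' (s : List Char) : ∀ (a : Int) (iN : Nat), iN < s.length →
    (PySem.List.enumerate s a).drop iN
      = (a + (iN : Int), s[iN]!) :: (PySem.List.enumerate s a).drop (iN + 1) := by
  induction s with
  | nil => intro a iN h; simp at h
  | cons x xs ih =>
    intro a iN h
    cases iN with
    | zero => simp [PySem.List.enumerate_cons]
    | succ j =>
      have hj : j < xs.length := by simpa using h
      simp only [PySem.List.enumerate_cons, List.drop_succ_cons, ih (a + 1) j hj,
        List.getElem!_cons_succ]
      congr 2
      push_cast
      ring

lemma enum_drop_len (s : List Char) : (PySem.List.enumerate s 0).drop s.length = [] := by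
  apply List.drop_eq_nil_of_le
  simp [PySem.List.length_enumerate]

lemma wnd_length (s : List Char) (kN iN : Nat) (h : iN ≤ s.length) :
    (wnd s kN iN).length = min iN kN := by
  simp [wnd]; omega

lemma take_add_one' (s : List Char) (iN : Nat) (h : iN < s.length) :
    s.take (iN + 1) = s.take iN ++ [s[iN]] := by
  rw [List.take_add_one, List.getElem?_eq_getElem h]
  rfl

lemma wnd_succ_small (s : List Char) (kN iN : Nat) (h : iN < s.length) (hik : iN < kN) :
    wnd s kN (iN + 1) = wnd s kN iN ++ [s[iN]] := by
  unfold wnd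
  rw [Nat.sub_eq_zero_of_le (by omega), Nat.sub_eq_zero_of_le (by omega),
    take_add_one' s iN h]
  simp

lemma wnd_succ_big (s : List Char) (kN iN : Nat) (h : iN < s.length) (hik : kN ≤ iN) (hk : 1 ≤ kN) :
    wnd s kN (iN + 1) = (wnd s kN iN).drop 1 ++ [s[iN]] := by
  unfold wnd
  rw [take_add_one' s iN h]
  rw [List.drop_append_of_le_length (by rw [List.length_take]; exact Nat.le_min.mpr ⟨by omega, by omega⟩)]
  rw [List.drop_drop]
  congr 2
  omega

lemma wnd_head (s : List Char) (kN iN : Nat) (h : iN < s.length) (hik : kN ≤ iN) (hk : 1 ≤ kN) :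
    wnd s kN iN = s[iN - kN]'(by omega) :: (wnd s kN iN).drop 1 := by
  unfold wnd
  rw [List.drop_eq_getElem_cons (by rw [List.length_take]; exact lt_min (by omega) (by omega))]
  simp [List.getElem_take]

-- the add step of B preserves the counter/dups invariant
lemma bAdd_inv (t : List Char) (c : Char) (counts : PySem.Dict Char Int) (dups : Int)
    (hc : ∀ x, counts.getD x 0 = (t.count x : Int))
    (hd : dups = (dupCount ↑t : Int)) :
    (∀ x, (bAdd counts dups c).1.getD x 0 = ((t ++ [c]).count x : Int)) ∧
      (bAdd counts dups c).2 = (dupCount ↑(t ++ [c]) : Int) := by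
  unfold bAdd
  simp only
  constructor
  · intro x
    rw [PySem.Dict.getD_insert]
    by_cases hx : x = c
    · rw [if_pos hx, hx, hc c]
      simp [List.count_append]
    · have hcx : ¬ c = x := fun h => hx h.symm
      rw [if_neg hx, hc x]
      simp [List.count_append, hcx]
  · rw [dup_append, hc c, hd]
    by_cases h2 : t.count c = 1
    · rw [if_pos h2, if_pos (by rw [h2]; norm_num)]
      push_cast; ring
    · rw [if_neg h2, if_neg (by intro hcon; apply h2; omega), Nat.add_zero]

lemma main_loop (s : List Char) (kN : Nat) (_hk : kN < s.length) :
    ∀ (fuel iN : Nat) (counts : PySem.Dict Char Int) (dups : Int),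
      iN + fuel = s.length →
      (∀ c, counts.getD c 0 = ((wnd s kN iN).count c : Int)) →
      dups = (dupCount (↑(wnd s kN iN)) : Int) →
      aGo (kN : Int) ((PySem.List.enumerate s 0).drop iN) (wnd s kN iN)
        = bGo s (kN : Int) ((PySem.List.enumerate s 0).drop iN) counts dups := by
  intro fuel
  induction fuel with
  | zero =>
    intro iN counts dups hlen _ _
    have : iN = s.length := by omega
    subst this
    rw [enum_drop_len]
    simp [aGo, bGo]
  | succ f ih =>
    intro iN counts dups hlen hc hd
    have hlt : iN < s.length := by omega
    rw [enum_drop' s 0 iN hlt]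
    have hget : s[iN]! = s[iN]'hlt := by simp [List.getElem!_eq_getElem?_getD, List.getElem?_eq_getElem hlt]
    set c := s[iN]'hlt with hcdef
    rw [hget]
    have hwlen : (wnd s kN iN).length = min iN kN := wnd_length s kN iN (by omega)
    simp only [aGo, bGo, zero_add]
    by_cases hik : kN ≤ iN
    · -- window is full
      have hwk : (wnd s kN iN).length = kN := by omega
      by_cases hnd : (wnd s kN iN).Nodup
      · -- all unique: both return the current index
        have hset : ((PySem.Set.ofList (wnd s kN iN)).length : Int) = (kN : Int) := by
          rw [(setlen_eq_iff _).mpr hnd, hwk]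
        have hdz : dups = 0 := by rw [hd, (dup_zero_iff _).mpr hnd]; rfl
        rw [if_pos ⟨by rw [hwk], hset⟩, if_pos (by exact_mod_cast hik), if_pos hdz]
      · -- duplicate present: slide the window
        have hk1 : 1 ≤ kN := by
          by_contra h0
          apply hnd
          have hnil : wnd s kN iN = [] := List.length_eq_zero_iff.mp (by omega)
          rw [hnil]
          exact List.nodup_nil
        have hset : ¬ ((PySem.Set.ofList (wnd s kN iN)).length : Int) = (kN : Int) := by
          intro hcon
          apply hnd
          apply (setlen_eq_iff _).mp
          rw [hwk]; exact_mod_cast hcon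
        have hdnz : ¬ dups = 0 := by
          rw [hd]
          intro hcon
          apply hnd
          apply (dup_zero_iff _).mp
          exact_mod_cast hcon
        rw [if_neg (by intro hcon; exact hset hcon.2),
          if_pos (show ((wnd s kN iN).length : Int) = (kN : Int) by rw [hwk]),
          if_pos (show ((kN : Int)) ≤ ((iN : Int)) by exact_mod_cast hik),
          if_neg hdnz]
        -- identify `old` with the head of the window
        have hidx : (iN : Int) - (kN : Int) = ((iN - kN : Nat) : Int) := by omega
        have hlt2 : iN - kN < s.length := by omega
        have hold : (PySem.List.pyGet? s ((iN : Int) - (kN : Int))).getD ' '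
            = s[iN - kN]'hlt2 := by
          rw [hidx, PySem.List.pyGet?_natCast, List.getElem?_eq_getElem hlt2]
          rfl
        have hhead := wnd_head s kN iN hlt hik hk1
        set t := (wnd s kN iN).drop 1 with htdef
        set old := s[iN - kN]'hlt2 with holddef
        -- counter facts after the removal step
        have hcount_w : ∀ x, (wnd s kN iN).count x = t.count x + (if x = old then 1 else 0) := by
          intro x
          rw [hhead]
          by_cases hx : x = old
          · simp [hx]
          · have hox : ¬ old = x := fun h => hx h.symm
            simp [hx, hox]
        have hc1 : counts.getD old 0 - 1 = (t.count old : Int) := by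
          rw [hc old, hcount_w old, if_pos rfl]
          push_cast; ring
        have hcounts1 : ∀ x, (counts.insert old (counts.getD old 0 - 1)).getD x 0 = (t.count x : Int) := by
          intro x
          rw [PySem.Dict.getD_insert]
          by_cases hx : x = old
          · rw [if_pos hx, hc1, hx]
          · rw [if_neg hx, hc x, hcount_w x, if_neg hx, Nat.add_zero]
        have hdupw : dupCount ↑(wnd s kN iN) = dupCount ↑t + (if t.count old = 1 then 1 else 0) := by
          conv_lhs => rw [hhead]
          rw [dup_cons_list]
        have hdups1 : (if counts.getD old 0 - 1 = 1 then dups - 1 else dups) = (dupCount ↑t : Int) := by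
          rw [hc1, hd, hdupw]
          by_cases h2 : t.count old = 1
          · rw [if_pos (by exact_mod_cast h2), if_pos h2]; push_cast; ring
          · rw [if_neg (by intro hcon; apply h2; exact_mod_cast hcon), if_neg h2, Nat.add_zero]
        obtain ⟨hcB, hdB⟩ := bAdd_inv t c (counts.insert old (counts.getD old 0 - 1))
          (if counts.getD old 0 - 1 = 1 then dups - 1 else dups) hcounts1 hdups1
        rw [hold]
        have hwnext : wnd s kN (iN + 1) = t ++ [c] := by
          rw [wnd_succ_big s kN iN hlt hik hk1]
        rw [PySem.List.slice_from_one, ← List.drop_one, ← htdef, ← hwnext]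
        exact ih (iN + 1) _ _ (by omega) (by rw [hwnext]; exact hcB) (by rw [hwnext]; exact hdB)
    · -- window still growing: both just add the new character
      have hik' : iN < kN := by omega
      have hwl : (wnd s kN iN).length = iN := by omega
      have hlenne : ¬ ((wnd s kN iN).length : Int) = (kN : Int) := by
        rw [hwl]; intro hcon; omega
      rw [if_neg (fun hcon => hlenne hcon.1), if_neg hlenne,
        if_neg (show ¬ ((kN : Int) ≤ (iN : Int)) by exact_mod_cast hik)]
      obtain ⟨hcB, hdB⟩ := bAdd_inv (wnd s kN iN) c counts dups hc hd
      have hwnext : wnd s kN (iN + 1) = wnd s kN iN ++ [c] := wnd_succ_small s kN iN hlt hik'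
      rw [← hwnext]
      exact ih (iN + 1) _ _ (by omega) (by rw [hwnext]; exact hcB) (by rw [hwnext]; exact hdB)

lemma aGo_none_neg (k : Int) (hk : k < 0) :
    ∀ (l : List (Int × Char)) (w : List Char), aGo k l w = none := by
  intro l
  induction l with
  | nil => intro w; simp [aGo]
  | cons p rest ih =>
    intro w
    obtain ⟨i, c⟩ := p
    rw [aGo, if_neg (by intro hcon; have := hcon.1; omega)]
    exact ih _

lemma aGo_none_big (s : List Char) (k : Int) (hk : (s.length : Int) ≤ k) :
    ∀ (fuel iN : Nat) (w : List Char), iN + fuel = s.length → w.length ≤ iN →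
      aGo k ((PySem.List.enumerate s 0).drop iN) w = none := by
  intro fuel
  induction fuel with
  | zero =>
    intro iN w hlen _
    have : iN = s.length := by omega
    subst this
    rw [enum_drop_len]
    simp [aGo]
  | succ f ih =>
    intro iN w hlen hwl
    have hlt : iN < s.length := by omega
    rw [enum_drop' s 0 iN hlt]
    have hne : ¬ ((w.length : Int) = k) := by intro hcon; omega
    rw [aGo, if_neg (fun hcon => hne hcon.1), if_neg hne]
    exact ih (iN + 1) (w ++ [s[iN]!]) (by omega) (by simp; omega)

-- ===== VERDICT (by name: the statement is the Claim_ definition above) =====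
theorem get_unique_substr_index_spec : Claim_equal_get_unique_substr_index := by
  intro ds k _
  unfold Spec_get_unique_substr_index get_unique_substr_index get_unique_substr_index_alt
  by_cases h1 : k < 0
  · rw [if_pos (Or.inl h1), aGo_none_neg k h1]
  by_cases h2 : (ds.toList.length : Int) ≤ k
  · rw [if_pos (Or.inr h2)]
    exact aGo_none_big ds.toList k h2 ds.toList.length 0 [] (by omega) (by simp)
  · rw [if_neg (not_or.mpr ⟨h1, h2⟩)]
    obtain ⟨kN, rfl⟩ : ∃ kN : Nat, k = (kN : Int) := ⟨k.toNat, (Int.toNat_of_nonneg (by omega)).symm⟩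
    have hklt : kN < ds.toList.length := by omega
    have h0 : wnd ds.toList kN 0 = [] := by simp [wnd]
    have := main_loop ds.toList kN hklt ds.toList.length 0 PySem.Dict.empty 0 (by omega)
      (by intro c; rw [h0]; simp [PySem.Dict.getD_empty])
      (by rw [h0]; simp [dupCount])
    rw [h0] at this
    simpa using this
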